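-- pv_equiv track=rewrite | github.com/Ferrari25/ParserASDPpy | Automatas.py | automata_finsi
-- ===== SOURCE A (Python) =====
-- ESTADO_FINAL = "ESTADO FINAL"
--
-- ESTADO_NO_FINAL = "NO ACEPTADO"
--
-- ESTADO_TRAMPA = "EN ESTADO TRAMPA"
--
-- def automata_finsi(lexema):
--         estadoactual=0
--         estadosfinales=[5]
--         for vcarac in lexema:
--             if estadoactual==0 and vcarac=='f':
--                 estadoactual=1
--             elif estadoactual==1 and vcarac=='i':
--                 estadoactual=2
--             elif estadoactual==2 and vcarac=='n':
--                 estadoactual=3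
--             elif estadoactual==3 and vcarac=='s':
--                 estadoactual=4
--             elif estadoactual==4 and vcarac=='i':
--                 estadoactual=5
--             else:
--                 estadoactual=-1
--                 break
--         if estadoactual == -1:
--              return ESTADO_TRAMPA
--         if estadoactual in estadosfinales:
--             return ESTADO_FINAL
--         else:
--             return ESTADO_NO_FINAL
-- ===== SOURCE B (Python) =====
-- ESTADO_FINAL = "ESTADO FINAL"
--
-- ESTADO_NO_FINAL = "NO ACEPTADO"
--
-- ESTADO_TRAMPA = "EN ESTADO TRAMPA"
--
-- def automata_finsi(lexema):
--     if lexema == 'finsi':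
--         return ESTADO_FINAL
--     if 'finsi'.startswith(lexema):
--         return ESTADO_NO_FINAL
--     return ESTADO_TRAMPA
-- ===== Notes on version B (the rewrite author's own statement) =====
-- stated objective: simpler
-- what changed: Replaces the 5-state transition loop over the characters with a closed-form decision on the target word: equality with 'finsi' gives the final state, a proper prefix (via str.startswith) gives the non-final state, anything else the trap.
import Mathlib
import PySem

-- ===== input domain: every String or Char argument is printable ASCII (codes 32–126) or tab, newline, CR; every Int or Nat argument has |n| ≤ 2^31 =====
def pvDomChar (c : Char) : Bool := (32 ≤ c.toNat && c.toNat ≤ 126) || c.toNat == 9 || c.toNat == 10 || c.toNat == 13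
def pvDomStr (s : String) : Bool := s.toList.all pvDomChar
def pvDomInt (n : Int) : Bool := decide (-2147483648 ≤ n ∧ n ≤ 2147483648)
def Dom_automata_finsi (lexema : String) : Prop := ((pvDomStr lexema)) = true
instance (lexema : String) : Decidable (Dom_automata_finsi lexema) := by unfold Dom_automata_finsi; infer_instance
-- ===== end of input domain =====

-- B replaces A's hand-written 5-state DFA loop with a closed-form decision on the
-- target word 'finsi' (equality / startswith); objective: simpler.

-- ===== PORT A =====
-- the for-loop of A: state is a Python int; 'break' with state -1 is modelled by
-- returning -1 immediately (the loop body never runs again after the break)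
def finsiLoop : Int → List Char → Int
  | e, [] => e
  | e, c :: cs =>
    if e = 0 ∧ c = 'f' then finsiLoop 1 cs
    else if e = 1 ∧ c = 'i' then finsiLoop 2 cs
    else if e = 2 ∧ c = 'n' then finsiLoop 3 cs
    else if e = 3 ∧ c = 's' then finsiLoop 4 cs
    else if e = 4 ∧ c = 'i' then finsiLoop 5 cs
    else -1

def automata_finsi (lexema : String) : String :=
  let estadoactual := finsiLoop 0 lexema.toList
  let estadosfinales : List Int := [5]
  if estadoactual = -1 then "EN ESTADO TRAMPA"
  else if estadoactual ∈ estadosfinales then "ESTADO FINAL"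
  else "NO ACEPTADO"

-- ===== PORT B =====
def automata_finsi_alt (lexema : String) : String :=
  if lexema = "finsi" then "ESTADO FINAL"
  else if PySem.Str.startswith "finsi" lexema then "NO ACEPTADO"
  else "EN ESTADO TRAMPA"

-- ===== PRECONDITION & SPEC =====
def Spec_automata_finsi (lexema : String) (out : String) : Prop := out = automata_finsi_alt lexema
instance (lexema : String) (out : String) : Decidable (Spec_automata_finsi lexema out) := by unfold Spec_automata_finsi; infer_instance

-- ===== CLAIM (what is proved, stated in full; the proofs are below) =====
def Claim_equal_automata_finsi : Prop := ∀ (lexema : String), Dom_automata_finsi lexema → Spec_automata_finsi lexema (automata_finsi lexema)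

-- ===== LEMMAS AND PROOFS =====

def pvTgt : List Char := ['f', 'i', 'n', 's', 'i']

theorem pvTgt_eq : "finsi".toList = pvTgt := by decide

theorem finsiStep0 (c : Char) (cs : List Char) :
    finsiLoop 0 (c :: cs) = if c = 'f' then finsiLoop 1 cs else -1 := by
  by_cases h : c = 'f' <;> simp [finsiLoop, h]

theorem finsiStep1 (c : Char) (cs : List Char) :
    finsiLoop 1 (c :: cs) = if c = 'i' then finsiLoop 2 cs else -1 := by
  by_cases h : c = 'i' <;> simp [finsiLoop, h]

theorem finsiStep2 (c : Char) (cs : List Char) :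
    finsiLoop 2 (c :: cs) = if c = 'n' then finsiLoop 3 cs else -1 := by
  by_cases h : c = 'n' <;> simp [finsiLoop, h]

theorem finsiStep3 (c : Char) (cs : List Char) :
    finsiLoop 3 (c :: cs) = if c = 's' then finsiLoop 4 cs else -1 := by
  by_cases h : c = 'i' <;> by_cases h2 : c = 's' <;> simp [finsiLoop, h, h2]

theorem finsiStep4 (c : Char) (cs : List Char) :
    finsiLoop 4 (c :: cs) = if c = 'i' then finsiLoop 5 cs else -1 := by
  by_cases h : c = 'i' <;> simp [finsiLoop, h]

theorem finsiStep5 (c : Char) (cs : List Char) : finsiLoop 5 (c :: cs) = -1 := by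
  simp [finsiLoop]

theorem finsiLoop_eq (cs : List Char) : ∀ (k : Nat), k ≤ 5 →
    finsiLoop (k : Int) cs =
      if cs <+: pvTgt.drop k then (k : Int) + cs.length else -1 := by
  induction cs with
  | nil =>
    intro k hk
    simp [finsiLoop]
  | cons c cs ih =>
    intro k hk
    have ih1 := ih 1 (by norm_num)
    have ih2 := ih 2 (by norm_num)
    have ih3 := ih 3 (by norm_num)
    have ih4 := ih 4 (by norm_num)
    have ih5 := ih 5 (by norm_num)
    push_cast at ih1 ih2 ih3 ih4 ih5
    interval_cases k <;> push_cast
    · rw [finsiStep0]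
      by_cases hc : c = 'f'
      · rw [if_pos hc, ih1, hc]
        simp only [pvTgt, List.drop, List.cons_prefix_cons, true_and]
        split <;> [skip; rfl]
        push_cast [List.length_cons]
        ring
      · rw [if_neg hc, if_neg]
        simp [pvTgt, List.cons_prefix_cons, hc]
    · rw [finsiStep1]
      by_cases hc : c = 'i'
      · rw [if_pos hc, ih2, hc]
        simp only [pvTgt, List.drop, List.cons_prefix_cons, true_and]
        split <;> [skip; rfl]
        push_cast [List.length_cons]
        ring
      · rw [if_neg hc, if_neg]
        simp [pvTgt, List.cons_prefix_cons, hc]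
    · rw [finsiStep2]
      by_cases hc : c = 'n'
      · rw [if_pos hc, ih3, hc]
        simp only [pvTgt, List.drop, List.cons_prefix_cons, true_and]
        split <;> [skip; rfl]
        push_cast [List.length_cons]
        ring
      · rw [if_neg hc, if_neg]
        simp [pvTgt, List.cons_prefix_cons, hc]
    · rw [finsiStep3]
      by_cases hc : c = 's'
      · rw [if_pos hc, ih4, hc]
        simp only [pvTgt, List.drop, List.cons_prefix_cons, true_and]
        split <;> [skip; rfl]
        push_cast [List.length_cons]
        ring
      · rw [if_neg hc, if_neg]
        simp [pvTgt, List.cons_prefix_cons, hc]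
    · rw [finsiStep4]
      by_cases hc : c = 'i'
      · rw [if_pos hc, ih5, hc]
        simp only [pvTgt, List.drop, List.cons_prefix_cons, true_and]
        split <;> [skip; rfl]
        push_cast [List.length_cons]
        ring
      · rw [if_neg hc, if_neg]
        simp [pvTgt, List.cons_prefix_cons, hc]
    · rw [finsiStep5, if_neg]
      simp [pvTgt]

theorem finsiLoop_zero (cs : List Char) :
    finsiLoop 0 cs = if cs <+: pvTgt then (cs.length : Int) else -1 := by
  have h := finsiLoop_eq cs 0 (by norm_num)
  push_cast at h
  simpa using h

-- ===== VERDICT (by name: the statement is the Claim_ definition above) =====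
theorem automata_finsi_spec : Claim_equal_automata_finsi := by
  intro lexema _
  unfold Spec_automata_finsi automata_finsi automata_finsi_alt
  have hsw : PySem.Str.startswith "finsi" lexema = true ↔ lexema.toList <+: pvTgt := by
    rw [PySem.Str.startswith_eq, ← pvTgt_eq]
    exact PySem.Chars.startswith_iff _ _
  have heq : (lexema = "finsi") ↔ lexema.toList = pvTgt := by
    rw [← pvTgt_eq]
    constructor
    · intro h; rw [h]
    · intro h; exact String.toList_inj.mp h
  simp only [finsiLoop_zero]
  by_cases hpre : lexema.toList <+: pvTgt
  · rw [if_pos hpre]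
    have hlen : lexema.toList.length ≤ 5 := by
      have := hpre.length_le
      simpa [pvTgt] using this
    by_cases h5 : lexema.toList.length = 5
    · have hfull : lexema.toList = pvTgt := by
        apply List.IsPrefix.eq_of_length hpre
        simp [pvTgt, h5]
      rw [if_neg (by omega), if_pos (by simp [h5]), if_pos (heq.mpr hfull)]
    · have hne : lexema ≠ "finsi" := fun h => h5 (by simp [heq.mp h, pvTgt])
      have hnm : ¬ ((lexema.toList.length : Int) ∈ ([5] : List Int)) := by simp only [List.mem_singleton]; omega
      rw [if_neg (show ¬ ((lexema.toList.length : Int) = -1) by omega), if_neg hnm,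
        if_neg hne, if_pos (hsw.mpr hpre)]
  · rw [if_neg hpre, if_pos rfl]
    have hne : lexema ≠ "finsi" := fun h => hpre (by rw [heq.mp h])
    rw [if_neg hne, if_neg (fun h => hpre (hsw.mp h))]
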